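-- pv_equiv track=rewrite | github.com/tapp-x/42SPE_total-perspective-vortex | src/csp.py | _select_component_indices
-- ===== SOURCE A (Python) =====
-- def _select_component_indices(total_components, n_components):
--     n_components = min(n_components, total_components)
--     indices = []
--     left = 0
--     right = total_components - 1
--
--     while len(indices) < n_components and left <= right:
--         indices.append(left)
--         if len(indices) < n_components and right != left:
--             indices.append(right)
--         left += 1
--         right -= 1
--
--     return indices
-- ===== SOURCE B (Python) =====
-- def _select_component_indices(total_components, n_components):
--     count = min(n_components, total_components)
--     return [i // 2 if i % 2 == 0 else total_components - 1 - i // 2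
--             for i in range(count)]
-- ===== Notes on version B (the rewrite author's own statement) =====
-- stated objective: simpler
-- what changed: Replaced the two-pointer while loop (left/right counters with a mid-point branch) by a single list comprehension over range(min(n_components, total_components)) emitting a closed-form index per position: i//2 for even i, total_components-1-i//2 for odd i.
import Mathlib
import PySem

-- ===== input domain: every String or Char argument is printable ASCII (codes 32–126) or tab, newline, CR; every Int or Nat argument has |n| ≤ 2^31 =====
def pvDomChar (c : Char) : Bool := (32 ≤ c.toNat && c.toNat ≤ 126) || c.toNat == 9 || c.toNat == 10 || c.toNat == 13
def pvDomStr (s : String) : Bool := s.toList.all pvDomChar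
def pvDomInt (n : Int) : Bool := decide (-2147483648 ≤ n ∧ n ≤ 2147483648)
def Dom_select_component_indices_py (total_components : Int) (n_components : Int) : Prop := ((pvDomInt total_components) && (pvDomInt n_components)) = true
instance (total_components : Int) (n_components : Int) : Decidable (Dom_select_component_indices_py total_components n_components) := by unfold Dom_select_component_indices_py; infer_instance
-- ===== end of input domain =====

-- B replaces A's two-pointer while loop by a list comprehension with a closed-form
-- index per position (objective: simpler); same return value on all int inputs.

-- ===== PORT A =====
-- A's while loop: state (indices, left, right), with n = min(n_components, total_components)
def selLoopA (n : Int) (indices : List Int) (left right : Int) : List Int :=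
  if h : (indices.length : Int) < n ∧ left ≤ right then
    selLoopA n
      (if (((indices ++ [left]).length : Int) < n ∧ right ≠ left)
        then indices ++ [left] ++ [right] else indices ++ [left])
      (left + 1) (right - 1)
  else indices
termination_by (right + 1 - left).toNat
decreasing_by omega

def select_component_indices_py (total_components : Int) (n_components : Int) : List Int :=
  let n := min n_components total_components
  selLoopA n [] 0 (total_components - 1)

-- ===== PORT B =====
def select_component_indices_py_alt (total_components : Int) (n_components : Int) : List Int :=
  let count := min n_components total_components
  (PySem.List.pyRange 0 count 1).map (fun i =>
    if PySem.Int.mod i 2 = 0 then PySem.Int.floordiv i 2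
    else total_components - 1 - PySem.Int.floordiv i 2)

-- ===== PRECONDITION & SPEC =====
def Spec_select_component_indices_py (total_components : Int) (n_components : Int) (out : List Int) : Prop := out = select_component_indices_py_alt total_components n_components
instance (total_components : Int) (n_components : Int) (out : List Int) : Decidable (Spec_select_component_indices_py total_components n_components out) := by unfold Spec_select_component_indices_py; infer_instance

-- ===== CLAIM (what is proved, stated in full; the proofs are below) =====
def Claim_equal_select_component_indices_py : Prop := ∀ (total_components : Int) (n_components : Int), Dom_select_component_indices_py total_components n_components → Spec_select_component_indices_py total_components n_components (select_component_indices_py total_components n_components)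

-- ===== LEMMAS AND PROOFS =====

-- B's per-position formula and B's full list, as proof-side names (defeq to the port's body)
def selF (t : Int) (i : Int) : Int :=
  if PySem.Int.mod i 2 = 0 then PySem.Int.floordiv i 2 else t - 1 - PySem.Int.floordiv i 2

def selL (t c : Int) : List Int := (PySem.List.pyRange 0 c 1).map (selF t)

lemma selL_length (t c : Int) : (selL t c).length = c.toNat := by
  simp [selL, PySem.List.length_pyRange_one]

lemma selF_even (t : Int) (l : Nat) : selF t ((2 * l : Nat) : Int) = l := by
  have h2 : (0:Int) < 2 := by omega
  simp only [selF, PySem.Int.mod_eq_emod_of_pos h2, PySem.Int.floordiv_eq_ediv_of_pos h2]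
  rw [if_pos (by omega)]
  omega

lemma selF_odd (t : Int) (l : Nat) : selF t ((2 * l + 1 : Nat) : Int) = t - 1 - l := by
  have h2 : (0:Int) < 2 := by omega
  simp only [selF, PySem.Int.mod_eq_emod_of_pos h2, PySem.Int.floordiv_eq_ediv_of_pos h2]
  rw [if_neg (by omega)]
  omega

lemma selL_getElem? (t c : Int) (k : Nat) (hk : k < c.toNat) :
    (selL t c)[k]? = some (selF t k) := by
  have hc : c = ((c.toNat : Nat) : Int) := by omega
  rw [selL, hc]
  exact PySem.List.getElem?_map_pyRange_zero (selF t) c.toNat k hk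

-- take one more element of selL
lemma selL_take_succ (t c : Int) (k : Nat) (hk : k < c.toNat) :
    (selL t c).take (k + 1) = (selL t c).take k ++ [selF t k] := by
  rw [List.take_add_one, selL_getElem? t c k hk]
  rfl

-- loop invariant: at iteration l the accumulator holds the first 2*l entries of selL
lemma selLoopA_invariant (t c : Int) (hc : c ≤ t) (l : Nat) :
    selLoopA c ((selL t c).take (2 * l)) (l : Int) (t - 1 - l) = selL t c := by
  rw [selLoopA]
  have hlen : (selL t c).length = c.toNat := selL_length t c
  have e1 : ((l : Int) + 1) = ((l + 1 : Nat) : Int) := by push_cast; ring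
  have e2 : t - 1 - (l : Int) - 1 = t - 1 - ((l + 1 : Nat) : Int) := by push_cast; ring
  by_cases hcont : (2 * (l : Int)) < c
  · -- loop body runs
    have hlt : 2 * l < c.toNat := by omega
    have htake : ((selL t c).take (2 * l)).length = 2 * l := by
      rw [List.length_take]; omega
    rw [dif_pos (by rw [htake]; refine ⟨?_, ?_⟩ <;> push_cast <;> omega)]
    have hstep1 : (selL t c).take (2 * l) ++ [(l : Int)] = (selL t c).take (2 * l + 1) := by
      rw [selL_take_succ t c (2 * l) hlt, selF_even]
    have hlen1 : ((selL t c).take (2 * l) ++ [(l : Int)]).length = 2 * l + 1 := by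
      simp [htake]
    by_cases hmore : (2 * (l : Int) + 1) < c
    · -- second append happens; right ≠ left since 2l+1 < c ≤ t
      have hne : t - 1 - (l : Int) ≠ (l : Int) := by omega
      have hlt2 : 2 * l + 1 < c.toNat := by omega
      have hstep2 : (selL t c).take (2 * l + 1) ++ [t - 1 - (l : Int)] =
          (selL t c).take (2 * l + 2) := by
        rw [selL_take_succ t c (2 * l + 1) hlt2, selF_odd]
      rw [if_pos ⟨by rw [hlen1]; push_cast; omega, hne⟩, hstep1]
      rw [show (selL t c).take (2 * l + 1) ++ [t - 1 - (l : Int)] =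
            (selL t c).take (2 * (l + 1)) from by rw [hstep2]; ring_nf]
      rw [e1, e2]
      exact selLoopA_invariant t c hc (l + 1)
    · -- 2l+1 = c : inner append skipped, take (2l+1) is already all of selL
      rw [if_neg (by rw [hlen1]; push_cast; omega), hstep1]
      have hall1 : (selL t c).take (2 * l + 1) = selL t c :=
        List.take_of_length_le (by omega)
      have hall2 : (selL t c).take (2 * (l + 1)) = selL t c :=
        List.take_of_length_le (by omega)
      rw [hall1, e1, e2]
      have hrec := selLoopA_invariant t c hc (l + 1)
      rwa [hall2] at hrec
  · -- loop exits: accumulator already equals selL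
    have htake : ((selL t c).take (2 * l)).length = c.toNat := by
      rw [List.length_take]; omega
    rw [dif_neg (by rw [htake]; omega)]
    exact List.take_of_length_le (by omega)
termination_by c.toNat - 2 * l
decreasing_by all_goals omega

-- ===== VERDICT (by name: the statement is the Claim_ definition above) =====
theorem select_component_indices_py_spec : Claim_equal_select_component_indices_py := by
  intro t n _
  show selLoopA (min n t) [] 0 (t - 1) = selL t (min n t)
  have h := selLoopA_invariant t (min n t) (min_le_right n t) 0
  simpa using h
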